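-- pv_equiv track=rewrite | github.com/glace23/CS325-A3 | Game.py | helper_game_topdown
-- ===== SOURCE A (Python) =====
-- def helper_game_topdown(n, turn="a", string = "", list=None):
--     if list is None:
--         list =[]
--     if n <= 1:
--         if turn == "b":
--             list.append(string+f"a win")
--         else:
--             list.append(string+f"a lost")
--     for i in range(1, n):
--         if n % i == 0:
--             if turn == "a":
--                 helper_game_topdown(n-i, "b", string+f"a{i}+", list)
--             else:
--                 helper_game_topdown(n-i, "a", string+f"b{i}+", list)
--     return list
-- ===== SOURCE B (Python) =====
-- def _divisors_sqrt(n):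
--     """Proper divisors i of n with 1 <= i < n, in increasing order, via an O(sqrt n) scan."""
--     small = []
--     large = []
--     i = 1
--     while i * i <= n:
--         if n % i == 0:
--             small.append(i)
--             j = n // i
--             if j != n and j != i:
--                 large.append(j)
--         i += 1
--     return small + large[::-1]
--
-- def helper_game_topdown(n, turn="a", string="", list=None):
--     if list is None:
--         list = []
--     if n <= 1:
--         list.append(string + ("a win" if turn == "b" else "a lost"))
--         return list
--     nxt = "b" if turn == "a" else "a"
--     tag = "a" if turn == "a" else "b"
--     for i in _divisors_sqrt(n):
--         helper_game_topdown(n - i, nxt, string + f"{tag}{i}+", list)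
--     return list
-- ===== Notes on version B (the rewrite author's own statement) =====
-- stated objective: alternative
-- what changed: B enumerates each node's proper divisors with an O(sqrt(n)) paired scan (small divisor i plus cofactor n//i, cofactors reversed to keep increasing order) instead of A's O(n) trial scan over range(1,n), and hoists the turn-dependent tag/next-turn computation out of the divisor loop.
import Mathlib
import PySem

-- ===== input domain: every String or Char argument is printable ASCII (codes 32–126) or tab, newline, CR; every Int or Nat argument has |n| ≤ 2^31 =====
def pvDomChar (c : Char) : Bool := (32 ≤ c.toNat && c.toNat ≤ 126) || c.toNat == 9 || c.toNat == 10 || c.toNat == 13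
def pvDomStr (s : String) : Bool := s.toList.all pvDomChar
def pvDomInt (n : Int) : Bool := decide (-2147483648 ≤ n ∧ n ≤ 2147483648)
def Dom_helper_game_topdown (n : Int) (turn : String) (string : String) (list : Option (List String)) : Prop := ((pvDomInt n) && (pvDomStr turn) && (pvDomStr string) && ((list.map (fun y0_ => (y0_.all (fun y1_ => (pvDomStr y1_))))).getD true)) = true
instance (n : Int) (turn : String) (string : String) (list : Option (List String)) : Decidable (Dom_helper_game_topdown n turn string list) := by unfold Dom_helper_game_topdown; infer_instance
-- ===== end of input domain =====

-- B replaces A's O(n) trial scan over range(1,n) per recursion node by an O(√n) paired divisor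
-- scan (small divisor + cofactor, cofactors reversed to keep increasing order); equivalence is
-- about the RETURN value (both Pythons also append to the caller-supplied 'list' in place).

-- ===== PORT A =====
-- fuel-guarded transcription of A's recursion; fuel n.toNat+1 always suffices
-- (each recursive call strictly decreases n by at least 1 and n ≤ 1 makes the loop empty).
def pvGoA : Nat → Int → String → String → List String → List String
  | 0, _, _, _, acc => acc
  | fuel+1, n, turn, s, acc =>
    let acc := if n ≤ 1 then
        (if turn = "b" then acc ++ [s ++ "a win"] else acc ++ [s ++ "a lost"])
      else acc
    (PySem.List.pyRange 1 n 1).foldl (fun acc i =>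
      if PySem.Int.mod n i = 0 then
        if turn = "a" then pvGoA fuel (n - i) "b" (s ++ "a" ++ PySem.Int.toStr i ++ "+") acc
        else pvGoA fuel (n - i) "a" (s ++ "b" ++ PySem.Int.toStr i ++ "+") acc
      else acc) acc

def helper_game_topdown (n : Int) (turn : String) (string : String) (list : Option (List String)) : List String :=
  pvGoA (n.toNat + 1) n turn string (list.getD [])

-- ===== PORT B =====
-- the while-loop of B's _divisors_sqrt, fuel-guarded (fuel n.toNat+1 suffices: i stops at √n)
def pvDivsLoop : Nat → Int → Int → List Int → List Int → List Int × List Int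
  | 0, _, _, small, large => (small, large)
  | fuel+1, n, i, small, large =>
    if i * i ≤ n then
      if PySem.Int.mod n i = 0 then
        let j := PySem.Int.floordiv n i
        if j ≠ n ∧ j ≠ i then pvDivsLoop fuel n (i+1) (small ++ [i]) (large ++ [j])
        else pvDivsLoop fuel n (i+1) (small ++ [i]) large
      else pvDivsLoop fuel n (i+1) small large
    else (small, large)

def pvDivisorsSqrt (n : Int) : List Int :=
  let p := pvDivsLoop (n.toNat + 1) n 1 [] []
  p.1 ++ p.2.reverse

def pvGoB : Nat → Int → String → String → List String → List String
  | 0, _, _, _, acc => acc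
  | fuel+1, n, turn, s, acc =>
    if n ≤ 1 then acc ++ [s ++ (if turn = "b" then "a win" else "a lost")]
    else
      let nxt := if turn = "a" then "b" else "a"
      let tag := if turn = "a" then "a" else "b"
      (pvDivisorsSqrt n).foldl (fun acc i =>
        pvGoB fuel (n - i) nxt (s ++ tag ++ PySem.Int.toStr i ++ "+") acc) acc

def helper_game_topdown_alt (n : Int) (turn : String) (string : String) (list : Option (List String)) : List String :=
  pvGoB (n.toNat + 1) n turn string (list.getD [])

-- ===== PRECONDITION & SPEC =====
-- Pre_ excludes n ≥ 9000: A's recursion descends one level per unit of n (via the divisor 1),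
-- so such n either exceed the interpreter's recursion limit and raise RecursionError or never
-- finish descending and returning through the exponentially many divisor chains — A returns a
-- value on no excluded input (B recurses to the same depth and raises there too).
def Pre_helper_game_topdown (n : Int) (turn : String) (string : String) (list : Option (List String)) : Prop := n < 9000
instance (n : Int) (turn : String) (string : String) (list : Option (List String)) : Decidable (Pre_helper_game_topdown n turn string list) := by unfold Pre_helper_game_topdown; infer_instance
def pvWitness_helper_game_topdown : Int × String × String × Option (List String) := (6, "a", "", none)

def Spec_helper_game_topdown (n : Int) (turn : String) (string : String) (list : Option (List String)) (out : List String) : Prop := out = helper_game_topdown_alt n turn string list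
instance (n : Int) (turn : String) (string : String) (list : Option (List String)) (out : List String) : Decidable (Spec_helper_game_topdown n turn string list out) := by unfold Spec_helper_game_topdown; infer_instance

-- ===== CLAIM (what is proved, stated in full; the proofs are below) =====
def Claim_equal_helper_game_topdown : Prop := ∀ (n : Int) (turn : String) (string : String) (list : Option (List String)), Dom_helper_game_topdown n turn string list → Pre_helper_game_topdown n turn string list → Spec_helper_game_topdown n turn string list (helper_game_topdown n turn string list)

-- ===== LEMMAS AND PROOFS =====

-- a 'for' loop that skips elements failing p is the fold over the filtered list
theorem pv_foldl_if_filter {α β : Type} (p : α → Prop) [DecidablePred p]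
    (f : β → α → β) (l : List α) (acc : β) :
    l.foldl (fun a x => if p x then f a x else a) acc
      = (l.filter (fun x => decide (p x))).foldl f acc := by
  induction l generalizing acc with
  | nil => rfl
  | cons x t ih =>
    by_cases hx : p x <;> simp [List.filter, hx, ih]

theorem pv_foldl_congr {α β : Type} {f g : β → α → β} (l : List α)
    (h : ∀ b a, a ∈ l → f b a = g b a) (acc : β) :
    l.foldl f acc = l.foldl g acc := by
  induction l generalizing acc with
  | nil => rfl
  | cons x t ih =>
    simp only [List.foldl_cons]
    rw [h acc x (by simp), ih (fun b a ha => h b a (by simp [ha]))]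

-- accumulator independence of the divisor loop
theorem pvDivsLoop_acc (n : Int) : ∀ (fuel : Nat) (i : Int) (s l : List Int),
      pvDivsLoop fuel n i s l
        = (s ++ (pvDivsLoop fuel n i [] []).1, l ++ (pvDivsLoop fuel n i [] []).2) := by
  intro fuel
  induction fuel with
  | zero => intro i s l; simp [pvDivsLoop]
  | succ f ih =>
    intro i s l
    by_cases h1 : i * i ≤ n
    · by_cases h2 : PySem.Int.mod n i = 0
      · by_cases h3 : PySem.Int.floordiv n i ≠ n ∧ PySem.Int.floordiv n i ≠ i
        · simp only [pvDivsLoop, if_pos h1, if_pos h2, if_pos h3]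
          rw [ih (i+1) (s++[i]) (l++[PySem.Int.floordiv n i]),
              ih (i+1) ([]++[i]) ([]++[PySem.Int.floordiv n i])]
          simp
        · simp only [pvDivsLoop, if_pos h1, if_pos h2, if_neg h3]
          rw [ih (i+1) (s++[i]) l, ih (i+1) ([]++[i]) []]
          simp
      · simp only [pvDivsLoop, if_pos h1, if_neg h2]
        exact ih (i+1) s l
    · simp [pvDivsLoop, h1]

-- one-step unfoldings of the divisor loop (accumulators pulled out via pvDivsLoop_acc)
theorem pvDivsLoop_stop (f : Nat) (n i : Int) (h1 : ¬ i * i ≤ n) :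
    pvDivsLoop (f+1) n i [] [] = ([], []) := by
  simp [pvDivsLoop, h1]

theorem pvDivsLoop_skip (f : Nat) (n i : Int) (h1 : i * i ≤ n)
    (h2 : ¬ PySem.Int.mod n i = 0) :
    pvDivsLoop (f+1) n i [] [] = pvDivsLoop f n (i+1) [] [] := by
  simp only [pvDivsLoop, if_pos h1, if_neg h2]

theorem pvDivsLoop_add (f : Nat) (n i : Int) (h1 : i * i ≤ n)
    (h2 : PySem.Int.mod n i = 0)
    (h3 : PySem.Int.floordiv n i ≠ n ∧ PySem.Int.floordiv n i ≠ i) :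
    pvDivsLoop (f+1) n i [] []
      = (i :: (pvDivsLoop f n (i+1) [] []).1,
         PySem.Int.floordiv n i :: (pvDivsLoop f n (i+1) [] []).2) := by
  simp only [pvDivsLoop, if_pos h1, if_pos h2, if_pos h3]
  rw [pvDivsLoop_acc n f (i+1) ([]++[i]) ([]++[PySem.Int.floordiv n i])]
  simp

theorem pvDivsLoop_small_only (f : Nat) (n i : Int) (h1 : i * i ≤ n)
    (h2 : PySem.Int.mod n i = 0)
    (h3 : ¬ (PySem.Int.floordiv n i ≠ n ∧ PySem.Int.floordiv n i ≠ i)) :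
    pvDivsLoop (f+1) n i [] []
      = (i :: (pvDivsLoop f n (i+1) [] []).1, (pvDivsLoop f n (i+1) [] []).2) := by
  simp only [pvDivsLoop, if_pos h1, if_pos h2, if_neg h3]
  rw [pvDivsLoop_acc n f (i+1) ([]++[i]) []]
  simp

-- membership in the small-divisor list
theorem pv_mem_small (n : Int) (hn : 2 ≤ n) :
    ∀ (fuel : Nat) (i : Int), 1 ≤ i → n < (i + fuel) * (i + fuel) →
      ∀ x, x ∈ (pvDivsLoop fuel n i [] []).1 ↔ i ≤ x ∧ x * x ≤ n ∧ x ∣ n := by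
  intro fuel
  induction fuel with
  | zero =>
    intro i hi hf x
    simp only [pvDivsLoop, List.not_mem_nil, false_iff]
    rintro ⟨hx1, hx2, -⟩
    push_cast at hf
    nlinarith
  | succ f ih =>
    intro i hi hf x
    have hf' : n < ((i+1) + f) * ((i+1) + f) := by push_cast at hf ⊢; nlinarith [hf]
    by_cases h1 : i * i ≤ n
    · have hstep := ih (i+1) (by omega) hf'
      by_cases h2 : PySem.Int.mod n i = 0
      · have hdvd : i ∣ n := (PySem.Int.mod_eq_zero_iff_dvd n i).mp h2
        have hiff : (x = i ∨ x ∈ (pvDivsLoop f n (i+1) [] []).1) ↔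
            (i ≤ x ∧ x * x ≤ n ∧ x ∣ n) := by
          rw [hstep x]
          constructor
          · rintro (rfl | ⟨hy1, hy2, hy3⟩)
            · exact ⟨le_refl _, h1, hdvd⟩
            · exact ⟨by omega, hy2, hy3⟩
          · rintro ⟨hx1, hx2, hx3⟩
            by_cases hxi : x = i
            · exact Or.inl hxi
            · exact Or.inr ⟨by omega, hx2, hx3⟩
        by_cases h3 : PySem.Int.floordiv n i ≠ n ∧ PySem.Int.floordiv n i ≠ i
        · rw [pvDivsLoop_add f n i h1 h2 h3]
          simpa using hiff
        · rw [pvDivsLoop_small_only f n i h1 h2 h3]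
          simpa using hiff
      · rw [pvDivsLoop_skip f n i h1 h2, hstep x]
        constructor
        · rintro ⟨hy1, hy2, hy3⟩; exact ⟨by omega, hy2, hy3⟩
        · rintro ⟨hx1, hx2, hx3⟩
          rcases eq_or_lt_of_le hx1 with heq | hlt
          · exact absurd ((PySem.Int.mod_eq_zero_iff_dvd n x).mpr hx3) (heq ▸ h2)
          · exact ⟨by omega, hx2, hx3⟩
    · rw [pvDivsLoop_stop f n i h1]
      simp only [List.not_mem_nil, false_iff]
      rintro ⟨hx1, hx2, -⟩
      nlinarith

-- membership in the large-divisor list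
theorem pv_mem_large (n : Int) (hn : 2 ≤ n) :
    ∀ (fuel : Nat) (i : Int), 1 ≤ i → n < (i + fuel) * (i + fuel) →
      ∀ x, x ∈ (pvDivsLoop fuel n i [] []).2 ↔
        1 ≤ x ∧ x ∣ n ∧ n < x * x ∧ x < n ∧ i * x ≤ n := by
  intro fuel
  induction fuel with
  | zero =>
    intro i hi hf x
    simp only [pvDivsLoop, List.not_mem_nil, false_iff]
    rintro ⟨hx1, ⟨d, hd⟩, hx3, hx4, hx5⟩
    push_cast at hf
    have hid : i ≤ d := by nlinarith
    have hdx : d < x := by nlinarith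
    nlinarith
  | succ f ih =>
    intro i hi hf x
    have hf' : n < ((i+1) + f) * ((i+1) + f) := by push_cast at hf ⊢; nlinarith [hf]
    by_cases h1 : i * i ≤ n
    · have hstep := ih (i+1) (by omega) hf'
      have hup : (1 ≤ x ∧ x ∣ n ∧ n < x * x ∧ x < n ∧ (i+1) * x ≤ n) →
          (1 ≤ x ∧ x ∣ n ∧ n < x * x ∧ x < n ∧ i * x ≤ n) := by
        rintro ⟨a, b, c, d, e⟩; exact ⟨a, b, c, d, by nlinarith⟩
      by_cases h2 : PySem.Int.mod n i = 0
      · have hdvd : i ∣ n := (PySem.Int.mod_eq_zero_iff_dvd n i).mp h2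
        have hji : PySem.Int.floordiv n i * i = n := by
          rw [PySem.Int.floordiv_eq_ediv_of_pos (show (0:Int) < i by omega)]
          exact Int.ediv_mul_cancel hdvd
        have hjpos : 0 < PySem.Int.floordiv n i := by nlinarith
        have hij : i ≤ PySem.Int.floordiv n i := by nlinarith
        have hjd : PySem.Int.floordiv n i ∣ n := ⟨i, hji.symm⟩
        have hdrop : (1 ≤ x ∧ x ∣ n ∧ n < x * x ∧ x < n ∧ i * x ≤ n) →
            ¬ ((i+1) * x ≤ n) → x = PySem.Int.floordiv n i := by
          rintro ⟨hy1, ⟨d, hd⟩, hy3, hy4, hy5⟩ hy6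
          push_neg at hy6
          have hid : i ≤ d := by nlinarith
          have hdi : d < i + 1 := by nlinarith
          have hdieq : i = d := by omega
          subst hdieq
          have hcan : PySem.Int.floordiv n i * i = x * i := by rw [hji, hd]
          exact (mul_right_cancel₀ (show (i:Int) ≠ 0 by omega) hcan).symm
        by_cases h3 : PySem.Int.floordiv n i ≠ n ∧ PySem.Int.floordiv n i ≠ i
        · have hCj : 1 ≤ PySem.Int.floordiv n i ∧ PySem.Int.floordiv n i ∣ n ∧
              n < PySem.Int.floordiv n i * PySem.Int.floordiv n i ∧
              PySem.Int.floordiv n i < n ∧ i * PySem.Int.floordiv n i ≤ n := by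
            have hijlt : i < PySem.Int.floordiv n i := lt_of_le_of_ne hij (Ne.symm h3.2)
            have hjn : PySem.Int.floordiv n i ≤ n := Int.le_of_dvd (by omega) hjd
            exact ⟨by omega, hjd, by nlinarith, lt_of_le_of_ne hjn h3.1, by nlinarith⟩
          rw [pvDivsLoop_add f n i h1 h2 h3]
          simp only [List.mem_cons, hstep x]
          constructor
          · rintro (rfl | hy)
            · exact hCj
            · exact hup hy
          · rintro hx
            by_cases hx6 : (i+1) * x ≤ n
            · exact Or.inr ⟨hx.1, hx.2.1, hx.2.2.1, hx.2.2.2.1, hx6⟩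
            · exact Or.inl (hdrop hx hx6)
        · rw [pvDivsLoop_small_only f n i h1 h2 h3, hstep x]
          constructor
          · exact hup
          · rintro hx
            by_cases hx6 : (i+1) * x ≤ n
            · exact ⟨hx.1, hx.2.1, hx.2.2.1, hx.2.2.2.1, hx6⟩
            · exfalso
              have hxj := hdrop hx hx6
              rcases not_and_or.mp h3 with hje | hje
              · push_neg at hje
                rw [hxj, hje] at hx
                exact absurd hx.2.2.2.1 (by omega)
              · push_neg at hje
                rw [hxj, hje] at hx
                nlinarith [hx.2.2.1]
      · rw [pvDivsLoop_skip f n i h1 h2, hstep x]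
        constructor
        · exact hup
        · rintro hx
          by_cases hx6 : (i+1) * x ≤ n
          · exact ⟨hx.1, hx.2.1, hx.2.2.1, hx.2.2.2.1, hx6⟩
          · exfalso
            obtain ⟨hy1, ⟨d, hd⟩, hy3, hy4, hy5⟩ := hx
            push_neg at hx6
            have hid : i ≤ d := by nlinarith
            have hdi : d < i + 1 := by nlinarith
            have hdieq : i = d := by omega
            subst hdieq
            exact h2 ((PySem.Int.mod_eq_zero_iff_dvd n i).mpr ⟨x, by rw [hd]; ring⟩)
    · rw [pvDivsLoop_stop f n i h1]
      simp only [List.not_mem_nil, false_iff]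
      push_neg at h1
      rintro ⟨hx1, ⟨d, hd⟩, hx3, hx4, hx5⟩
      have hid : i ≤ d := by nlinarith
      have hdx : d < x := by nlinarith
      nlinarith

theorem pv_pairwise_small (n : Int) (hn : 2 ≤ n) :
    ∀ (fuel : Nat) (i : Int), 1 ≤ i → n < (i + fuel) * (i + fuel) →
      ((pvDivsLoop fuel n i [] []).1).Pairwise (· < ·) := by
  intro fuel
  induction fuel with
  | zero => intro i hi hf; simp [pvDivsLoop]
  | succ f ih =>
    intro i hi hf
    have hf' : n < ((i+1) + f) * ((i+1) + f) := by push_cast at hf ⊢; nlinarith [hf]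
    have htail := ih (i+1) (by omega) hf'
    have hbound : ∀ y ∈ (pvDivsLoop f n (i+1) [] []).1, i < y := by
      intro y hy
      have := (pv_mem_small n hn f (i+1) (by omega) hf' y).mp hy
      omega
    by_cases h1 : i * i ≤ n
    · by_cases h2 : PySem.Int.mod n i = 0
      · by_cases h3 : PySem.Int.floordiv n i ≠ n ∧ PySem.Int.floordiv n i ≠ i
        · rw [pvDivsLoop_add f n i h1 h2 h3]
          exact List.pairwise_cons.mpr ⟨hbound, htail⟩
        · rw [pvDivsLoop_small_only f n i h1 h2 h3]
          exact List.pairwise_cons.mpr ⟨hbound, htail⟩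
      · rw [pvDivsLoop_skip f n i h1 h2]; exact htail
    · rw [pvDivsLoop_stop f n i h1]; simp

theorem pv_pairwise_large (n : Int) (hn : 2 ≤ n) :
    ∀ (fuel : Nat) (i : Int), 1 ≤ i → n < (i + fuel) * (i + fuel) →
      ((pvDivsLoop fuel n i [] []).2).Pairwise (· > ·) := by
  intro fuel
  induction fuel with
  | zero => intro i hi hf; simp [pvDivsLoop]
  | succ f ih =>
    intro i hi hf
    have hf' : n < ((i+1) + f) * ((i+1) + f) := by push_cast at hf ⊢; nlinarith [hf]
    have htail := ih (i+1) (by omega) hf'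
    by_cases h1 : i * i ≤ n
    · by_cases h2 : PySem.Int.mod n i = 0
      · have hdvd : i ∣ n := (PySem.Int.mod_eq_zero_iff_dvd n i).mp h2
        have hji : PySem.Int.floordiv n i * i = n := by
          rw [PySem.Int.floordiv_eq_ediv_of_pos (show (0:Int) < i by omega)]
          exact Int.ediv_mul_cancel hdvd
        have hbound : ∀ y ∈ (pvDivsLoop f n (i+1) [] []).2, y < PySem.Int.floordiv n i := by
          intro y hy
          have hc := (pv_mem_large n hn f (i+1) (by omega) hf' y).mp hy
          nlinarith [hc.1, hc.2.2.2.2]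
        by_cases h3 : PySem.Int.floordiv n i ≠ n ∧ PySem.Int.floordiv n i ≠ i
        · rw [pvDivsLoop_add f n i h1 h2 h3]
          exact List.pairwise_cons.mpr ⟨hbound, htail⟩
        · rw [pvDivsLoop_small_only f n i h1 h2 h3]; exact htail
      · rw [pvDivsLoop_skip f n i h1 h2]; exact htail
    · rw [pvDivsLoop_stop f n i h1]; simp

-- the O(√n) scan produces exactly A's increasing filtered range of proper divisors
theorem pv_divisors_eq (n : Int) (hn : 2 ≤ n) :
    pvDivisorsSqrt n
      = (PySem.List.pyRange 1 n 1).filter (fun i => decide (PySem.Int.mod n i = 0)) := by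
  have hcast : ((n.toNat : Int)) = n := Int.toNat_of_nonneg (by omega)
  have hf : n < ((1:Int) + (n.toNat + 1 : Nat)) * ((1:Int) + (n.toNat + 1 : Nat)) := by
    push_cast [hcast]; nlinarith
  set S := (pvDivsLoop (n.toNat + 1) n 1 [] []).1 with hS
  set L := (pvDivsLoop (n.toNat + 1) n 1 [] []).2 with hL
  have hmS : ∀ x, x ∈ S ↔ 1 ≤ x ∧ x * x ≤ n ∧ x ∣ n := by
    intro x; rw [hS]; exact pv_mem_small n hn (n.toNat + 1) 1 le_rfl hf x
  have hmL : ∀ x, x ∈ L ↔ 1 ≤ x ∧ x ∣ n ∧ n < x * x ∧ x < n ∧ 1 * x ≤ n := by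
    intro x; rw [hL]; exact pv_mem_large n hn (n.toNat + 1) 1 le_rfl hf x
  have hpS : S.Pairwise (· < ·) := by
    rw [hS]; exact pv_pairwise_small n hn (n.toNat + 1) 1 le_rfl hf
  have hpL : L.Pairwise (· > ·) := by
    rw [hL]; exact pv_pairwise_large n hn (n.toNat + 1) 1 le_rfl hf
  set G := S ++ L.reverse with hG
  set F := (PySem.List.pyRange 1 n 1).filter (fun i => decide (PySem.Int.mod n i = 0)) with hF
  have hpG : G.Pairwise (· < ·) := by
    rw [hG]
    refine List.pairwise_append.mpr ⟨hpS, List.pairwise_reverse.mpr hpL, ?_⟩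
    intro a ha b hb
    have hA := (hmS a).mp ha
    have hB := (hmL b).mp (List.mem_reverse.mp hb)
    nlinarith [hA.1, hA.2.1, hB.1, hB.2.2.1]
  have hpF : F.Pairwise (· < ·) := by
    rw [hF]; exact List.Pairwise.filter _ (PySem.List.pairwise_lt_pyRange_one 1 n)
  have hmem : ∀ x, x ∈ G ↔ x ∈ F := by
    intro x
    rw [hG, hF, List.mem_append, List.mem_reverse, List.mem_filter, PySem.List.mem_pyRange_one]
    simp only [decide_eq_true_eq]
    constructor
    · rintro (hx | hx)
      · have h := (hmS x).mp hx
        have hxn : x ≤ n := Int.le_of_dvd (by omega) h.2.2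
        have hxlt : x < n := by
          rcases eq_or_lt_of_le hxn with rfl | h'
          · nlinarith [h.2.1]
          · exact h'
        exact ⟨⟨h.1, hxlt⟩, (PySem.Int.mod_eq_zero_iff_dvd n x).mpr h.2.2⟩
      · have h := (hmL x).mp hx
        exact ⟨⟨h.1, h.2.2.2.1⟩, (PySem.Int.mod_eq_zero_iff_dvd n x).mpr h.2.1⟩
    · rintro ⟨⟨hx1, hx2⟩, hx3⟩
      have hdvd : x ∣ n := (PySem.Int.mod_eq_zero_iff_dvd n x).mp hx3
      by_cases hsq : x * x ≤ n
      · exact Or.inl ((hmS x).mpr ⟨hx1, hsq, hdvd⟩)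
      · exact Or.inr ((hmL x).mpr ⟨hx1, hdvd, by omega, hx2, by omega⟩)
  have hndG : G.Nodup := hpG.imp (fun h => ne_of_lt h)
  have hndF : F.Nodup := hpF.imp (fun h => ne_of_lt h)
  have hperm : G.Perm F := (List.perm_ext_iff_of_nodup hndG hndF).mpr hmem
  have h1 : PySem.List.sorted F (fun x => x) = G :=
    PySem.List.sorted_eq_of_perm_of_pairwise_lt F G (fun x => x) hperm hpG
  have h2 : PySem.List.sorted F (fun x => x) = F :=
    PySem.List.sorted_eq_self_of_pairwise F (fun x => x) (hpF.imp (fun h => le_of_lt h))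
  show G = F
  rw [← h1, h2]

theorem pv_go_eq (fuel : Nat) :
    ∀ (n : Int) (turn s : String) (acc : List String),
      pvGoA fuel n turn s acc = pvGoB fuel n turn s acc := by
  induction fuel with
  | zero => intro n turn s acc; rfl
  | succ f ih =>
    intro n turn s acc
    by_cases hn : n ≤ 1
    · simp only [pvGoA, pvGoB, if_pos hn, PySem.List.pyRange_one_eq_nil (by omega : n ≤ 1),
        List.foldl_nil]
      by_cases ht : turn = "b" <;> simp [ht]
    · simp only [pvGoA, pvGoB, if_neg hn]
      rw [pv_foldl_if_filter (fun i => PySem.Int.mod n i = 0)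
            (fun acc i =>
              if turn = "a" then pvGoA f (n - i) "b" (s ++ "a" ++ PySem.Int.toStr i ++ "+") acc
              else pvGoA f (n - i) "a" (s ++ "b" ++ PySem.Int.toStr i ++ "+") acc),
          ← pv_divisors_eq n (by omega)]
      apply pv_foldl_congr
      intro b a _
      by_cases ht : turn = "a" <;> simp [ht, ih]

-- ===== VERDICT (by name: the statement is the Claim_ definition above) =====
theorem helper_game_topdown_spec : Claim_equal_helper_game_topdown := by
  intro n turn string list _ _
  unfold Spec_helper_game_topdown helper_game_topdown helper_game_topdown_alt
  exact pv_go_eq _ n turn string _
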